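-- pv_equiv track=rewrite | github.com/phaquinosilva/axc-dt | comparators/nbit/analysis/nbit_comparators.py | n_edc
-- ===== SOURCE A (Python) =====
-- def n_edc(a: int, b: int, n: int) -> int:
--     """Exact Dedicated Comparator (EDC)"""
--     # formatting stuff
--     a = format(a, "#0%db" % (n + 2))[:1:-1]
--     b = format(b, "#0%db" % (n + 2))[:1:-1]
--     a = list(map(int, a))
--     b = list(map(int, b))
--     # compute xnors
--     eq = [0] * n
--     for i in range(1, n):
--         eq[i] = ~(a[i] ^ b[i])
--     # compute greater for each bit
--     g = [0] * n
--     for i in range(n):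
--         temp = 1
--         for k in range(i + 1, n):
--             temp &= eq[k]
--         g[i] = temp & a[i] & ~b[i]
--     # compute final comparison
--     greater = 0
--     for i in range(n):
--         greater |= g[i]
--     return ~greater & 1 == 1
-- ===== SOURCE B (Python) =====
-- def n_edc(a: int, b: int, n: int) -> bool:
--     """Exact Dedicated Comparator (EDC): a (low n bits) not greater than b."""
--     mask = (1 << n) - 1 if n > 0 else 0
--     return (a & mask) <= (b & mask)
-- ===== Notes on version B (the rewrite author's own statement) =====
-- stated objective: faster
-- what changed: Replaces the bit-string formatting plus O(n^2) per-bit XNOR/suffix-AND gate simulation with a single arithmetic comparison of the low n bits obtained by masking with 2^n-1.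
import Mathlib
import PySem

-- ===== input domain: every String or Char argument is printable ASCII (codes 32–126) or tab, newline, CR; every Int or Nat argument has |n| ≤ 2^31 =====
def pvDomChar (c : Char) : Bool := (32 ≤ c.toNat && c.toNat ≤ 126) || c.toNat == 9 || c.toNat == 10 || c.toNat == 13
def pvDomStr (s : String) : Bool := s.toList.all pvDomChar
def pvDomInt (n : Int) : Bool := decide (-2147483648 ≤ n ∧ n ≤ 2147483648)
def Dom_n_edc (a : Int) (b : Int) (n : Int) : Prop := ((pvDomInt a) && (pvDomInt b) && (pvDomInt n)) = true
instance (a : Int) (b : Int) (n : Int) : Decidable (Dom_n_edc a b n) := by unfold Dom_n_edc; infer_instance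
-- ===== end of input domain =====

-- B replaces A's O(n^2) per-bit XNOR/suffix-AND gate simulation over formatted bit strings
-- by a single masked arithmetic comparison of the low n bits.

-- ===== PORT A =====

-- helper for Python's format(x, "#0...b"): MSB-first binary digit characters of a positive Nat
def pvBinPos (m : Nat) : List Char :=
  if h : m = 0 then [] else pvBinPos (m / 2) ++ [if m % 2 = 1 then '1' else '0']
decreasing_by exact Nat.div_lt_self (Nat.pos_of_ne_zero h) (by omega)

-- format(x, "#0%db" % (n+2))[:1:-1] followed by list(map(int, ·)), for x ≥ 0
-- ([:1:-1] = reverse of everything after the "0b" prefix)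
def pvFmtBits (x : Int) (n : Int) : List Int :=
  let bin : List Char := if x.toNat = 0 then ['0'] else pvBinPos x.toNat
  let pad : List Char := List.replicate ((n + 2) - (2 + (bin.length : Int))).toNat '0'
  let s : List Char := '0' :: 'b' :: (pad ++ bin)
  ((s.drop 2).reverse).map (fun c => if c = '1' then (1 : Int) else 0)

def n_edc (a : Int) (b : Int) (n : Int) : Bool :=
  let aL := pvFmtBits a n
  let bL := pvFmtBits b n
  let eq := (PySem.List.pyRange 1 n 1).foldl
    (fun eq i => PySem.List.pySetD eq i
      (Int.not (PySem.Int.bxor (PySem.List.pyGetD aL i 0) (PySem.List.pyGetD bL i 0))))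
    (List.replicate n.toNat 0)
  let g := (PySem.List.pyRange 0 n 1).foldl
    (fun g i =>
      let temp := (PySem.List.pyRange (i + 1) n 1).foldl
        (fun temp k => PySem.Int.band temp (PySem.List.pyGetD eq k 0)) 1
      PySem.List.pySetD g i
        (PySem.Int.band (PySem.Int.band temp (PySem.List.pyGetD aL i 0))
          (Int.not (PySem.List.pyGetD bL i 0))))
    (List.replicate n.toNat 0)
  let greater := (PySem.List.pyRange 0 n 1).foldl
    (fun greater i => PySem.Int.bor greater (PySem.List.pyGetD g i 0)) 0
  decide (PySem.Int.band (Int.not greater) 1 = 1)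

-- ===== PORT B =====
def n_edc_alt (a : Int) (b : Int) (n : Int) : Bool :=
  let mask : Int := if 0 < n then ((1 : Int) <<< n.toNat) - 1 else 0
  decide (PySem.Int.band a mask ≤ PySem.Int.band b mask)

-- ===== PRECONDITION & SPEC =====
-- Pre_ excludes inputs on which the Python A raises ValueError: negative a or b (int() hits the
-- sign/'b' character of the binary format) and n < -2 (negative format width).
def Pre_n_edc (a : Int) (b : Int) (n : Int) : Prop := 0 ≤ a ∧ 0 ≤ b ∧ -2 ≤ n
instance (a : Int) (b : Int) (n : Int) : Decidable (Pre_n_edc a b n) := by unfold Pre_n_edc; infer_instance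
def pvWitness_n_edc : Int × Int × Int := (5, 3, 4)

def Spec_n_edc (a : Int) (b : Int) (n : Int) (out : Bool) : Prop := out = n_edc_alt a b n
instance (a : Int) (b : Int) (n : Int) (out : Bool) : Decidable (Spec_n_edc a b n out) := by unfold Spec_n_edc; infer_instance

-- ===== CLAIM (what is proved, stated in full; the proofs are below) =====
def Claim_equal_n_edc : Prop := ∀ (a : Int) (b : Int) (n : Int), Dom_n_edc a b n → Pre_n_edc a b n → Spec_n_edc a b n (n_edc a b n)

-- ===== LEMMAS AND PROOFS =====

def pvBit (x : Nat) (k : Nat) : Int := if x.testBit k then 1 else 0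

theorem pv_getD_replicate (k j : Nat) : (List.replicate k (0 : Int)).getD j 0 = 0 := by
  rcases Nat.lt_or_ge j k with h | h
  · rw [List.getD_eq_getElem _ _ (by simpa using h)]
    simp
  · rw [List.getD_eq_default _ _ (by simpa using h)]

theorem pv_getD_set (l : List Int) (j k : Nat) (v : Int) :
    (l.set j v).getD k 0 = if k = j ∧ j < l.length then v else l.getD k 0 := by
  by_cases h1 : k = j
  · subst h1
    by_cases h2 : k < l.length
    · rw [if_pos ⟨rfl, h2⟩, List.getD_eq_getElem _ _ (by simpa using h2)]
      simp
    · rw [if_neg (by tauto), List.set_eq_of_length_le (by omega)]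
  · rw [if_neg (by tauto)]
    rcases Nat.lt_or_ge k l.length with h2 | h2
    · rw [List.getD_eq_getElem _ _ (by simpa using h2),
        List.getD_eq_getElem _ _ (by simpa using h2)]
      rw [List.getElem_set_ne (by omega)]
    · rw [List.getD_eq_default _ _ (by simpa using h2),
        List.getD_eq_default _ _ (by simpa using h2)]

theorem pvBinPos_lt (m : Nat) : m < 2 ^ (pvBinPos m).length := by
  induction m using Nat.strong_induction_on with
  | _ m ih =>
    rw [pvBinPos]
    split
    · next h => subst h; simp
    · next h =>
      have ih2 := ih (m / 2) (Nat.div_lt_self (Nat.pos_of_ne_zero h) (by omega))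
      rw [List.length_append, List.length_singleton, pow_succ]
      omega

theorem pvBinPos_getD (m : Nat) :
    ∀ i : Nat,
    (((pvBinPos m).reverse).map (fun c => if c = '1' then (1 : Int) else 0)).getD i 0 = pvBit m i := by
  induction m using Nat.strong_induction_on with
  | _ m ih =>
    intro i
    rw [pvBinPos]
    split
    · next h => subst h; simp [pvBit, Nat.zero_testBit]
    · next h =>
      rw [List.reverse_append, List.reverse_singleton, List.singleton_append, List.map_cons]
      cases i with
      | zero =>
        by_cases hm : m % 2 = 1 <;>
          simp [hm, pvBit, Nat.testBit_zero]
      | succ i =>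
        have ih2 := ih (m / 2) (Nat.div_lt_self (Nat.pos_of_ne_zero h) (by omega)) i
        simp only [List.getD_cons_succ]
        rw [ih2]
        simp [pvBit, Nat.testBit_succ]

theorem pvFmtBits_getD (x n : Int) (i : Nat) :
    (pvFmtBits x n).getD i 0 = pvBit x.toNat i := by
  unfold pvFmtBits
  simp only [List.drop_succ_cons, List.drop_zero, List.reverse_append, List.map_append,
    List.reverse_replicate, List.map_replicate]
  have hf0 : (if ('0' : Char) = '1' then (1 : Int) else 0) = 0 := by decide
  rw [hf0]
  set bin : List Char := if x.toNat = 0 then ['0'] else pvBinPos x.toNat with hbin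
  set core := (bin.reverse).map (fun c => if c = '1' then (1 : Int) else 0) with hcore
  have hlen : core.length = bin.length := by simp [hcore]
  rcases Nat.lt_or_ge i core.length with hi | hi
  · rw [List.getD_append _ _ _ _ hi]
    by_cases hx0 : x.toNat = 0
    · rw [hbin] at hcore
      rw [if_pos hx0] at hcore
      have hc : core = [0] := by rw [hcore]; decide
      rw [hc] at hi ⊢
      simp at hi
      subst hi
      simp [pvBit, hx0, Nat.zero_testBit]
    · rw [hbin] at hcore
      rw [if_neg hx0] at hcore
      rw [hcore]
      exact pvBinPos_getD x.toNat i
  · rw [List.getD_append_right _ _ _ _ hi, pv_getD_replicate]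
    by_cases hx0 : x.toNat = 0
    · simp [pvBit, hx0, Nat.zero_testBit]
    · have hbl : bin.length = (pvBinPos x.toNat).length := by
        rw [hbin, if_neg hx0]
      have hlt : x.toNat < 2 ^ i := by
        have h1 := pvBinPos_lt x.toNat
        have h2 : (pvBinPos x.toNat).length ≤ i := by omega
        calc x.toNat < 2 ^ (pvBinPos x.toNat).length := h1
          _ ≤ 2 ^ i := Nat.pow_le_pow_right (by omega) h2
      simp [pvBit, Nat.testBit_lt_two_pow hlt]

theorem pv_band_zero (x : Int) : PySem.Int.band 0 x = 0 := by
  rw [PySem.Int.band_comm]; exact PySem.Int.band_zero x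

theorem pv_band_zero_foldl (l : List Int) (g : Int → Int) :
    l.foldl (fun t k => PySem.Int.band t (g k)) 0 = 0 := by
  induction l with
  | nil => rfl
  | cons x l ih => rw [List.foldl_cons, pv_band_zero]; exact ih

theorem pv_setD_fold (F : Int → Int) (b : Int) :
    ∀ (fuel : Nat) (a : Int) (init : List Int), 0 ≤ a → fuel = (b - a).toNat →
    ∀ (k : Nat),
    ((PySem.List.pyRange a b 1).foldl (fun l i => PySem.List.pySetD l i (F i)) init).getD k 0
      = if a ≤ (k : Int) ∧ (k : Int) < b ∧ k < init.length then F k else init.getD k 0 := by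
  intro fuel
  induction fuel with
  | zero =>
    intro a init ha hf k
    rw [PySem.List.pyRange_one_eq_nil (by omega)]
    rw [if_neg (by omega)]
    rfl
  | succ fuel ih =>
    intro a init ha hf k
    rw [PySem.List.pyRange_one_cons (by omega), List.foldl_cons]
    rw [ih (a + 1) (PySem.List.pySetD init a (F a)) (by omega) (by omega) k]
    rw [PySem.List.pySetD_of_nonneg init (F a) ha]
    rw [List.length_set, pv_getD_set]
    have hak : ((a.toNat : Int)) = a := Int.toNat_of_nonneg ha
    by_cases h2 : k = a.toNat ∧ a.toNat < init.length
    · have hk : (k : Int) = a := by omega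
      rw [if_neg (show ¬(a + 1 ≤ (k : Int) ∧ (k : Int) < b ∧ k < init.length) by omega)]
      rw [if_pos h2]
      rw [if_pos (show a ≤ (k : Int) ∧ (k : Int) < b ∧ k < init.length by
        refine ⟨by omega, by omega, by omega⟩)]
      rw [hk]
    · rw [if_neg h2]
      by_cases h1 : a + 1 ≤ (k : Int) ∧ (k : Int) < b ∧ k < init.length
      · rw [if_pos h1, if_pos (show a ≤ (k : Int) ∧ (k : Int) < b ∧ k < init.length by
          exact ⟨by omega, h1.2.1, h1.2.2⟩)]
      · rw [if_neg h1,
          if_neg (show ¬(a ≤ (k : Int) ∧ (k : Int) < b ∧ k < init.length) by omega)]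

theorem pv_temp_fold_pos (n : Int) (L : List Int) (E : Nat → Bool)
    (hL : ∀ k : Nat, 1 ≤ (k : Int) → (k : Int) < n → L.getD k 0 = if E k then (-1 : Int) else -2) :
    ∀ (fuel : Nat) (m : Int), 1 ≤ m → fuel = (n - m).toNat →
    (∀ j : Nat, m ≤ (j : Int) → (j : Int) < n → E j = true) →
    (PySem.List.pyRange m n 1).foldl (fun t k => PySem.Int.band t (PySem.List.pyGetD L k 0)) 1 = 1 := by
  intro fuel
  induction fuel with
  | zero =>
    intro m h1 hf _
    rw [PySem.List.pyRange_one_eq_nil (by omega)]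
    rfl
  | succ fuel ih =>
    intro m h1 hf hP
    rw [PySem.List.pyRange_one_cons (by omega), List.foldl_cons]
    have hmc : ((m.toNat : Int)) = m := Int.toNat_of_nonneg (by omega)
    have hg : PySem.List.pyGetD L m 0 = L.getD m.toNat 0 :=
      PySem.List.pyGetD_of_nonneg L 0 (by omega)
    rw [hg, hL m.toNat (by omega) (by omega), hP m.toNat (by omega) (by omega), if_pos rfl]
    have hb1 : PySem.Int.band 1 (-1) = 1 := by decide
    rw [hb1]
    exact ih (m + 1) (by omega) (by omega) (fun j hj1 hj2 => hP j (by omega) hj2)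

theorem pv_temp_fold_neg (n : Int) (L : List Int) (E : Nat → Bool)
    (hL : ∀ k : Nat, 1 ≤ (k : Int) → (k : Int) < n → L.getD k 0 = if E k then (-1 : Int) else -2) :
    ∀ (fuel : Nat) (m : Int), 1 ≤ m → fuel = (n - m).toNat →
    ∀ (j0 : Nat), m ≤ (j0 : Int) → (j0 : Int) < n → E j0 = false →
    (PySem.List.pyRange m n 1).foldl (fun t k => PySem.Int.band t (PySem.List.pyGetD L k 0)) 1 = 0 := by
  intro fuel
  induction fuel with
  | zero =>
    intro m h1 hf j0 hj1 hj2 hj3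
    omega
  | succ fuel ih =>
    intro m h1 hf j0 hj1 hj2 hj3
    rw [PySem.List.pyRange_one_cons (by omega), List.foldl_cons]
    have hmc : ((m.toNat : Int)) = m := Int.toNat_of_nonneg (by omega)
    have hg : PySem.List.pyGetD L m 0 = L.getD m.toNat 0 :=
      PySem.List.pyGetD_of_nonneg L 0 (by omega)
    rw [hg, hL m.toNat (by omega) (by omega)]
    by_cases hEm : E m.toNat = true
    · rw [if_pos hEm]
      have hb1 : PySem.Int.band 1 (-1) = 1 := by decide
      rw [hb1]
      have hne : j0 ≠ m.toNat := by
        intro he; rw [he] at hj3; rw [hj3] at hEm; exact Bool.false_ne_true hEm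
      exact ih (m + 1) (by omega) (by omega) j0 (by omega) hj2 hj3
    · rw [if_neg hEm]
      have hb2 : PySem.Int.band 1 (-2) = 0 := by decide
      rw [hb2]
      exact pv_band_zero_foldl _ _

theorem pv_or_keep1 (n : Int) (L : List Int) (Q : Nat → Bool)
    (hL : ∀ k : Nat, (k : Int) < n → L.getD k 0 = if Q k then (1 : Int) else 0) :
    ∀ (fuel : Nat) (m : Int), 0 ≤ m → fuel = (n - m).toNat →
    (PySem.List.pyRange m n 1).foldl (fun t k => PySem.Int.bor t (PySem.List.pyGetD L k 0)) 1 = 1 := by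
  intro fuel
  induction fuel with
  | zero =>
    intro m h1 hf
    rw [PySem.List.pyRange_one_eq_nil (by omega)]
    rfl
  | succ fuel ih =>
    intro m h1 hf
    rw [PySem.List.pyRange_one_cons (by omega), List.foldl_cons]
    have hmc : ((m.toNat : Int)) = m := Int.toNat_of_nonneg (by omega)
    have hg : PySem.List.pyGetD L m 0 = L.getD m.toNat 0 :=
      PySem.List.pyGetD_of_nonneg L 0 (by omega)
    rw [hg, hL m.toNat (by omega)]
    have hbor : PySem.Int.bor 1 (if Q m.toNat then (1 : Int) else 0) = 1 := by
      by_cases hq : Q m.toNat = true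
      · rw [if_pos hq]; decide
      · rw [if_neg hq]; decide
    rw [hbor]
    exact ih (m + 1) (by omega) (by omega)

theorem pv_or_fold_pos (n : Int) (L : List Int) (Q : Nat → Bool)
    (hL : ∀ k : Nat, (k : Int) < n → L.getD k 0 = if Q k then (1 : Int) else 0) :
    ∀ (fuel : Nat) (m : Int), 0 ≤ m → fuel = (n - m).toNat →
    ∀ (j0 : Nat), m ≤ (j0 : Int) → (j0 : Int) < n → Q j0 = true →
    (PySem.List.pyRange m n 1).foldl (fun t k => PySem.Int.bor t (PySem.List.pyGetD L k 0)) 0 = 1 := by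
  intro fuel
  induction fuel with
  | zero =>
    intro m h1 hf j0 hj1 hj2 hj3
    omega
  | succ fuel ih =>
    intro m h1 hf j0 hj1 hj2 hj3
    rw [PySem.List.pyRange_one_cons (by omega), List.foldl_cons]
    have hmc : ((m.toNat : Int)) = m := Int.toNat_of_nonneg (by omega)
    have hg : PySem.List.pyGetD L m 0 = L.getD m.toNat 0 :=
      PySem.List.pyGetD_of_nonneg L 0 (by omega)
    rw [hg, hL m.toNat (by omega)]
    by_cases hq : Q m.toNat = true
    · rw [if_pos hq]
      have hb : PySem.Int.bor 0 1 = 1 := by decide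
      rw [hb]
      exact pv_or_keep1 n L Q hL (n - (m + 1)).toNat (m + 1) (by omega) rfl
    · rw [if_neg hq]
      have hb : PySem.Int.bor 0 0 = 0 := by decide
      rw [hb]
      have hne : j0 ≠ m.toNat := by
        intro he; rw [he] at hj3; exact hq hj3
      exact ih (m + 1) (by omega) (by omega) j0 (by omega) hj2 hj3

theorem pv_or_fold_neg (n : Int) (L : List Int) (Q : Nat → Bool)
    (hL : ∀ k : Nat, (k : Int) < n → L.getD k 0 = if Q k then (1 : Int) else 0) :
    ∀ (fuel : Nat) (m : Int), 0 ≤ m → fuel = (n - m).toNat →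
    (∀ j : Nat, m ≤ (j : Int) → (j : Int) < n → Q j = false) →
    (PySem.List.pyRange m n 1).foldl (fun t k => PySem.Int.bor t (PySem.List.pyGetD L k 0)) 0 = 0 := by
  intro fuel
  induction fuel with
  | zero =>
    intro m h1 hf _
    rw [PySem.List.pyRange_one_eq_nil (by omega)]
    rfl
  | succ fuel ih =>
    intro m h1 hf hP
    rw [PySem.List.pyRange_one_cons (by omega), List.foldl_cons]
    have hmc : ((m.toNat : Int)) = m := Int.toNat_of_nonneg (by omega)
    have hg : PySem.List.pyGetD L m 0 = L.getD m.toNat 0 :=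
      PySem.List.pyGetD_of_nonneg L 0 (by omega)
    rw [hg, hL m.toNat (by omega), hP m.toNat (by omega) (by omega)]
    have hb : PySem.Int.bor 0 (if false = true then (1 : Int) else 0) = 0 := by decide
    rw [hb]
    exact ih (m + 1) (by omega) (by omega) (fun j hj1 hj2 => hP j (by omega) hj2)

theorem pv_xnor_val (x y k : Nat) :
    Int.not (PySem.Int.bxor (pvBit x k) (pvBit y k))
      = if (x.testBit k == y.testBit k) then (-1 : Int) else -2 := by
  unfold pvBit
  cases hx : x.testBit k <;> cases hy : y.testBit k <;> simp <;> decide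

theorem pv_g_val (x y j : Nat) (c : Bool) :
    PySem.Int.band (PySem.Int.band (if c then (1 : Int) else 0) (pvBit x j)) (Int.not (pvBit y j))
      = if (c && x.testBit j && !y.testBit j) then (1 : Int) else 0 := by
  unfold pvBit
  cases c <;> cases hx : x.testBit j <;> cases hy : y.testBit j <;> simp <;> decide

theorem pv_le_iff_bits (x y : Nat) :
    x ≤ y ↔ ∀ j : Nat, (∀ k, j < k → x.testBit k = y.testBit k) →
      x.testBit j = true → y.testBit j = true := by
  constructor
  · intro hxy j hk hxj
    by_contra hyj
    have hyj' : y.testBit j = false := by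
      cases h : y.testBit j
      · rfl
      · exact absurd h hyj
    have : y < x := Nat.lt_of_testBit j hyj' hxj (fun k hk' => (hk k hk').symm)
    omega
  · intro H
    by_contra hxy
    have hyx : y < x := by omega
    have hne : x ≠ y := by omega
    have hex : ∃ i, x.testBit i ≠ y.testBit i := by
      by_contra hall
      push_neg at hall
      exact hne (Nat.eq_of_testBit_eq hall)
    obtain ⟨i0, hi0⟩ := hex
    have hbound : ∀ i, x.testBit i ≠ y.testBit i → i ≤ x + y := by
      intro i hi
      by_contra hgt
      push_neg at hgt
      have hxi : x < 2 ^ i := by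
        calc x ≤ x + y := by omega
          _ < 2 ^ (x + y) := Nat.lt_two_pow_self
          _ ≤ 2 ^ i := Nat.pow_le_pow_right (by omega) (by omega)
      have hyi : y < 2 ^ i := by
        calc y ≤ x + y := by omega
          _ < 2 ^ (x + y) := Nat.lt_two_pow_self
          _ ≤ 2 ^ i := Nat.pow_le_pow_right (by omega) (by omega)
      rw [Nat.testBit_lt_two_pow hxi, Nat.testBit_lt_two_pow hyi] at hi
      exact hi rfl
    set j := Nat.findGreatest (fun i => x.testBit i ≠ y.testBit i) (x + y) with hj
    have hPj : x.testBit j ≠ y.testBit j :=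
      Nat.findGreatest_spec (P := fun i => x.testBit i ≠ y.testBit i) (hbound i0 hi0) hi0
    have hgr : ∀ k, j < k → x.testBit k = y.testBit k := by
      intro k hk
      by_cases hkb : k ≤ x + y
      · by_contra hne'
        exact Nat.findGreatest_is_greatest hk hkb hne'
      · have hxi : x < 2 ^ k := by
          calc x ≤ x + y := by omega
            _ < 2 ^ (x + y) := Nat.lt_two_pow_self
            _ ≤ 2 ^ k := Nat.pow_le_pow_right (by omega) (by omega)
        have hyi : y < 2 ^ k := by
          calc y ≤ x + y := by omega
            _ < 2 ^ (x + y) := Nat.lt_two_pow_self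
            _ ≤ 2 ^ k := Nat.pow_le_pow_right (by omega) (by omega)
        rw [Nat.testBit_lt_two_pow hxi, Nat.testBit_lt_two_pow hyi]
    cases hxj : x.testBit j with
    | false =>
      have hyt : y.testBit j = true := by
        cases hy : y.testBit j
        · rw [hxj, hy] at hPj; exact absurd rfl hPj
        · rfl
      have : x < y := Nat.lt_of_testBit j hxj hyt hgr
      omega
    | true =>
      have hyt := H j hgr hxj
      rw [hxj, hyt] at hPj
      exact hPj rfl

theorem n_edc_alt_eq_mod (a b n : Int) (ha : 0 ≤ a) (hb : 0 ≤ b) :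
    n_edc_alt a b n = decide (a.toNat % 2 ^ n.toNat ≤ b.toNat % 2 ^ n.toNat) := by
  simp only [n_edc_alt]
  by_cases hn : 0 < n
  · rw [if_pos hn]
    have hmask : ((1 : Int) <<< n.toNat) - 1 = (((2 ^ n.toNat - 1 : Nat) : Int)) := by
      rw [Int.shiftLeft_eq]
      have h1 : (1 : Nat) ≤ 2 ^ n.toNat := Nat.one_le_two_pow
      push_cast [h1]
      ring
    rw [hmask, PySem.Int.band_of_nonneg ha (by positivity),
      PySem.Int.band_of_nonneg hb (by positivity)]
    have htn : (((2 ^ n.toNat - 1 : Nat) : Int)).toNat = 2 ^ n.toNat - 1 := Int.toNat_natCast _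
    rw [htn, Nat.and_two_pow_sub_one_eq_mod, Nat.and_two_pow_sub_one_eq_mod]
    rw [decide_eq_decide]
    exact Int.ofNat_le
  · rw [if_neg hn]
    rw [PySem.Int.band_zero, PySem.Int.band_zero]
    have h0 : n.toNat = 0 := by omega
    rw [h0]
    simp [Nat.mod_one]

theorem n_edc_eq_mod (a b n : Int) (ha : 0 ≤ a) (hb : 0 ≤ b) :
    n_edc a b n = decide (a.toNat % 2 ^ n.toNat ≤ b.toNat % 2 ^ n.toNat) := by
  by_cases hn : n ≤ 0
  · unfold n_edc
    rw [PySem.List.pyRange_one_eq_nil (show n ≤ 1 by omega)]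
    rw [PySem.List.pyRange_one_eq_nil (show n ≤ 0 by omega)]
    simp only [List.foldl_nil]
    have h0 : n.toNat = 0 := by omega
    rw [h0]
    have hband : PySem.Int.band (Int.not 0) 1 = 1 := by decide
    simp [hband, Nat.mod_one]
  · push_neg at hn
    have hNn : ((n.toNat : Int)) = n := Int.toNat_of_nonneg (by omega)
    set N := n.toNat with hN
    set ta := a.toNat with hta
    set tb := b.toNat with htb
    set E : Nat → Bool := fun k => ta.testBit k == tb.testBit k with hE
    set hi : Nat → Bool := fun j => decide (∀ k, k < N → j < k → E k = true) with hhi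
    set Q : Nat → Bool := fun j => hi j && ta.testBit j && !tb.testBit j with hQ
    unfold n_edc
    simp only []
    -- characterize the eq list
    set eqL := (PySem.List.pyRange 1 n 1).foldl
      (fun l i => PySem.List.pySetD l i
        (Int.not (PySem.Int.bxor (PySem.List.pyGetD (pvFmtBits a n) i 0)
          (PySem.List.pyGetD (pvFmtBits b n) i 0))))
      (List.replicate N 0) with heqL
    have h_eq : ∀ k : Nat, 1 ≤ (k : Int) → (k : Int) < n →
        eqL.getD k 0 = if E k then (-1 : Int) else -2 := by
      intro k hk1 hk2
      rw [heqL, pv_setD_fold _ n (n - 1).toNat 1 _ (by omega) (by omega) k]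
      rw [if_pos ⟨hk1, hk2, by simp [List.length_replicate]; omega⟩]
      rw [PySem.List.pyGetD_natCast, PySem.List.pyGetD_natCast,
        pvFmtBits_getD, pvFmtBits_getD]
      exact pv_xnor_val ta tb k
    -- characterize the g list
    set gL := (PySem.List.pyRange 0 n 1).foldl
      (fun l i => PySem.List.pySetD l i
        (PySem.Int.band
          (PySem.Int.band
            ((PySem.List.pyRange (i + 1) n 1).foldl
              (fun t k => PySem.Int.band t (PySem.List.pyGetD eqL k 0)) 1)
            (PySem.List.pyGetD (pvFmtBits a n) i 0))
          (Int.not (PySem.List.pyGetD (pvFmtBits b n) i 0))))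
      (List.replicate N 0) with hgL
    have h_g : ∀ k : Nat, (k : Int) < n → gL.getD k 0 = if Q k then (1 : Int) else 0 := by
      intro k hk
      rw [hgL, pv_setD_fold _ n n.toNat 0 _ (by omega) (by omega) k]
      rw [if_pos ⟨by omega, hk, by simp [List.length_replicate]; omega⟩]
      rw [PySem.List.pyGetD_natCast, PySem.List.pyGetD_natCast,
        pvFmtBits_getD, pvFmtBits_getD]
      have htemp : ((PySem.List.pyRange ((k : Int) + 1) n 1).foldl
          (fun t k => PySem.Int.band t (PySem.List.pyGetD eqL k 0)) 1)
          = if hi k then (1 : Int) else 0 := by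
        by_cases hc : hi k = true
        · rw [if_pos hc]
          rw [hhi] at hc
          simp only [decide_eq_true_eq] at hc
          exact pv_temp_fold_pos n eqL E h_eq (n - ((k : Int) + 1)).toNat ((k : Int) + 1)
            (by omega) rfl
            (fun j hj1 hj2 => hc j (by omega) (by omega))
        · rw [if_neg hc]
          rw [hhi] at hc
          simp only [decide_eq_true_eq] at hc
          push_neg at hc
          obtain ⟨j0, hj0N, hj0k, hj0E⟩ := hc
          exact pv_temp_fold_neg n eqL E h_eq (n - ((k : Int) + 1)).toNat ((k : Int) + 1)
            (by omega) rfl j0 (by omega) (by omega)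
            (by
              cases h : E j0 with
              | false => rfl
              | true => exact absurd h hj0E)
      rw [htemp, pv_g_val ta tb k (hi k)]
    -- the greater fold and the final decision
    by_cases hex : ∃ j : Nat, (j : Int) < n ∧ Q j = true
    · obtain ⟨j0, hj0n, hj0Q⟩ := hex
      rw [pv_or_fold_pos n gL Q h_g n.toNat 0 (by omega) (by omega) j0 (by omega) hj0n hj0Q]
      have hL : decide (PySem.Int.band (Int.not 1) 1 = 1) = false := by decide
      rw [hL]
      -- show the mod comparison is false
      have hnle : ¬ (ta % 2 ^ N ≤ tb % 2 ^ N) := by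
        intro hle
        have hQ' := hj0Q
        rw [hQ] at hQ'
        simp only [Bool.and_eq_true, Bool.not_eq_true'] at hQ'
        obtain ⟨⟨hhi', hta'⟩, htb'⟩ := hQ'
        rw [hhi] at hhi'
        simp only [decide_eq_true_eq] at hhi'
        have hj0N : j0 < N := by omega
        have hx : (ta % 2 ^ N).testBit j0 = true := by
          rw [Nat.testBit_mod_two_pow]
          simp [hj0N, hta']
        have hk : ∀ k, j0 < k → (ta % 2 ^ N).testBit k = (tb % 2 ^ N).testBit k := by
          intro k hkj
          rw [Nat.testBit_mod_two_pow, Nat.testBit_mod_two_pow]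
          by_cases hkN : k < N
          · have hEk := hhi' k hkN hkj
            rw [hE] at hEk
            simp only [beq_iff_eq] at hEk
            simp [hkN, hEk]
          · simp [hkN]
        have hy := (pv_le_iff_bits _ _).mp hle j0 hk hx
        rw [Nat.testBit_mod_two_pow] at hy
        simp [hj0N, htb'] at hy
      rw [decide_eq_false hnle]
    · rw [pv_or_fold_neg n gL Q h_g n.toNat 0 (by omega) (by omega)
        (fun j _ hjn => by
          cases h : Q j
          · rfl
          · exact absurd ⟨j, hjn, h⟩ hex)]
      have hL : decide (PySem.Int.band (Int.not 0) 1 = 1) = true := by decide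
      rw [hL]
      have hle : ta % 2 ^ N ≤ tb % 2 ^ N := by
        apply (pv_le_iff_bits _ _).mpr
        intro j hk hxj
        rw [Nat.testBit_mod_two_pow] at hxj
        simp only [Bool.and_eq_true, decide_eq_true_eq] at hxj
        obtain ⟨hjN, htaj⟩ := hxj
        rw [Nat.testBit_mod_two_pow]
        by_contra hyj
        have htbj : tb.testBit j = false := by
          cases h : tb.testBit j
          · rfl
          · exact absurd (by simp [hjN, h]) hyj
        have hQj : Q j = true := by
          rw [hQ]
          simp only [Bool.and_eq_true, Bool.not_eq_true']
          refine ⟨⟨?_, htaj⟩, htbj⟩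
          rw [hhi]
          simp only [decide_eq_true_eq]
          intro k hkN hjk
          have := hk k hjk
          rw [Nat.testBit_mod_two_pow, Nat.testBit_mod_two_pow] at this
          simp only [hkN, decide_true, Bool.true_and] at this
          rw [hE]
          simp [this]
        exact hex ⟨j, by omega, hQj⟩
      rw [decide_eq_true hle]

-- ===== VERDICT (by name: the statement is the Claim_ definition above) =====
theorem n_edc_spec : Claim_equal_n_edc := by
  intro a b n _ hpre
  unfold Spec_n_edc
  rw [n_edc_eq_mod a b n hpre.1 hpre.2.1, n_edc_alt_eq_mod a b n hpre.1 hpre.2.1]
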